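-- pv_equiv track=rewrite | github.com/jingshanghonoka10-jpg/mypython-Atcoder | practice.py | ary_system
-- ===== SOURCE A (Python) =====
-- def ary_system(num):
--
--     #下記の条件分岐では num == 0 の時の場合を書いていないから先に書く
--     if num == 0:
--         return "0"     #　←ここでの0を数字で返しちゃうとstrとintの間で喧嘩が起こる（41行目）
--
--     #初期値設定
--     a = 0
--     i = 0
--
--     #1桁ずつ取り出して10進数へ変換
--     while num > 0:
--         a += (num % 10) * 8**i   #aに10進法の数字を入れる
--         num = num // 10
--         i += 1
--
--
--     #10進数から9進数へ
--
--     #リストに%の計算した結果を入れていく作戦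
--     b = []
--
--     #余りの計算で9進数を作る
--     while a > 0 :
--         b.append(a % 9)
--         a = a // 9
--
--     #出力の順番が逆なので反転させる
--     b.reverse()
--
--     #リストの中身を結合
--     ans = "".join(map(str,b))
--
--     return ans
-- ===== SOURCE B (Python) =====
-- def ary_system(num):
--     # Recursive decomposition: interpret the decimal digits of num as base-8
--     # (most-significant first via recursion on num // 10), then render the
--     # value in base 9 by building the string directly most-significant first.
--     def oct_value(n):
--         return 0 if n <= 0 else 8 * oct_value(n // 10) + n % 10
--
--     def to9(a):
--         return "" if a <= 0 else to9(a // 9) + str(a % 9)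
--
--     if num == 0:
--         return "0"
--     return to9(oct_value(num))
-- ===== Notes on version B (the rewrite author's own statement) =====
-- stated objective: alternative
-- what changed: Replaces A's two while-loops (power-indexed digit accumulation, then remainder list + reverse + join) with two small recursions: a Horner-style recursive oct_value over the decimal digits and a recursive base-9 renderer that builds the string most-significant-digit first, with no list, reverse or join.
import Mathlib
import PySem

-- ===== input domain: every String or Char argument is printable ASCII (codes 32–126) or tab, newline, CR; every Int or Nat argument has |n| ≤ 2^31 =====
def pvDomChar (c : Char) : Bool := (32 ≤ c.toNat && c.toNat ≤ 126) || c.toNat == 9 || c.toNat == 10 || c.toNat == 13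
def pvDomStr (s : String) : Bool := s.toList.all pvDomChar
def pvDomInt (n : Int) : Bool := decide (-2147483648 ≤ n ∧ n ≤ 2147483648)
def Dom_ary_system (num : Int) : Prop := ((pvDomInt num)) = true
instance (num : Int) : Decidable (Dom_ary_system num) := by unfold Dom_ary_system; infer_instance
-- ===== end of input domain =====

-- B replaces A's two while-loops by two direct recursions (Horner-style base-8 value, then a
-- most-significant-first base-9 renderer); same return value, no speed claim.

-- termination helper both ports' while-loop recursions cite: num // k shrinks for num > 0, 1 < k
theorem pvFloordivToNatLt (a : Int) (k : Nat) (ha : 0 < a) (hk : 1 < k) :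
    (PySem.Int.floordiv a (k : Int)).toNat < a.toNat := by
  have h1 : PySem.Int.floordiv ((a.toNat : Int)) (k : Int) = ((a.toNat / k : Nat) : Int) :=
    PySem.Int.floordiv_natCast a.toNat k
  rw [show a = (a.toNat : Int) by omega, h1]
  simp only [Int.toNat_natCast]
  exact Nat.div_lt_self (by omega) hk

-- ===== PORT A =====
-- while num > 0: a += (num % 10) * 8**i; num //= 10; i += 1
def aryLoop1 (num a : Int) (i : Nat) : Int :=
  if h : num > 0 then
    aryLoop1 (PySem.Int.floordiv num 10) (a + PySem.Int.mod num 10 * 8 ^ i) (i + 1)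
  else a
termination_by num.toNat
decreasing_by exact_mod_cast pvFloordivToNatLt num 10 h (by omega)

-- while a > 0: b.append(a % 9); a //= 9
def aryLoop2 (a : Int) (b : List Int) : List Int :=
  if h : a > 0 then
    aryLoop2 (PySem.Int.floordiv a 9) (b ++ [PySem.Int.mod a 9])
  else b
termination_by a.toNat
decreasing_by exact_mod_cast pvFloordivToNatLt a 9 h (by omega)

def ary_system (num : Int) : String :=
  if num = 0 then "0"
  else
    let a := aryLoop1 num 0 0
    let b := (aryLoop2 a []).reverse
    PySem.Str.join "" (b.map PySem.Int.toStr)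

-- ===== PORT B =====
-- def oct_value(n): return 0 if n <= 0 else 8 * oct_value(n // 10) + n % 10
def octValue (n : Int) : Int :=
  if h : n ≤ 0 then 0
  else 8 * octValue (PySem.Int.floordiv n 10) + PySem.Int.mod n 10
termination_by n.toNat
decreasing_by exact_mod_cast pvFloordivToNatLt n 10 (by omega) (by omega)

-- def to9(a): return "" if a <= 0 else to9(a // 9) + str(a % 9)   (built on List Char; exact:
-- Python concatenation of these digit strings = append of their character lists)
def to9Chars (a : Int) : List Char :=
  if h : a ≤ 0 then []
  else to9Chars (PySem.Int.floordiv a 9) ++ PySem.Int.toChars (PySem.Int.mod a 9)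
termination_by a.toNat
decreasing_by exact_mod_cast pvFloordivToNatLt a 9 (by omega) (by omega)

def ary_system_alt (num : Int) : String :=
  if num = 0 then "0"
  else String.ofList (to9Chars (octValue num))

-- ===== PRECONDITION & SPEC =====
def Spec_ary_system (num : Int) (out : String) : Prop := out = ary_system_alt num
instance (num : Int) (out : String) : Decidable (Spec_ary_system num out) := by unfold Spec_ary_system; infer_instance

-- ===== CLAIM (what is proved, stated in full; the proofs are below) =====
def Claim_equal_ary_system : Prop := ∀ (num : Int), Dom_ary_system num → Spec_ary_system num (ary_system num)

-- ===== LEMMAS AND PROOFS =====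

theorem octValue_pos {n : Int} (h : ¬ n ≤ 0) :
    octValue n = 8 * octValue (PySem.Int.floordiv n 10) + PySem.Int.mod n 10 := by
  rw [octValue, dif_neg h]

theorem octValue_nonpos {n : Int} (h : n ≤ 0) : octValue n = 0 := by
  rw [octValue, dif_pos h]

theorem to9Chars_pos {a : Int} (h : ¬ a ≤ 0) :
    to9Chars a = to9Chars (PySem.Int.floordiv a 9) ++ PySem.Int.toChars (PySem.Int.mod a 9) := by
  rw [to9Chars, dif_neg h]

theorem to9Chars_nonpos {a : Int} (h : a ≤ 0) : to9Chars a = [] := by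
  rw [to9Chars, dif_pos h]

-- A's first loop computes acc + 8^i * (base-8 reading of the remaining decimal digits)
theorem aryLoop1_eq (num a : Int) (i : Nat) :
    aryLoop1 num a i = a + 8 ^ i * octValue num := by
  fun_induction aryLoop1 num a i with
  | case1 num a i h ih =>
      rw [ih]
      conv_rhs => rw [octValue_pos (show ¬ num ≤ 0 by omega)]
      ring
  | case2 num a i h =>
      rw [octValue_nonpos (by omega)]
      ring

-- the least-significant-first remainder list A's second loop builds
def rem9 (a : Int) : List Int :=
  if h : a > 0 then PySem.Int.mod a 9 :: rem9 (PySem.Int.floordiv a 9) else []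
termination_by a.toNat
decreasing_by exact_mod_cast pvFloordivToNatLt a 9 h (by omega)

theorem rem9_pos {a : Int} (h : a > 0) :
    rem9 a = PySem.Int.mod a 9 :: rem9 (PySem.Int.floordiv a 9) := by
  rw [rem9, dif_pos h]

theorem rem9_nonpos {a : Int} (h : ¬ a > 0) : rem9 a = [] := by
  rw [rem9, dif_neg h]

theorem aryLoop2_eq (a : Int) (b : List Int) :
    aryLoop2 a b = b ++ rem9 a := by
  fun_induction aryLoop2 a b with
  | case1 a b h ih => rw [ih, rem9_pos h]; simp
  | case2 a b h => rw [rem9_nonpos h]; simp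

theorem join_empty_flatten (parts : List (List Char)) :
    PySem.Chars.join [] parts = parts.flatten := by
  induction parts with
  | nil => simp [PySem.Chars.join_nil]
  | cons p ps ih =>
      cases ps with
      | nil => simp [PySem.Chars.join_singleton]
      | cons q qs =>
          rw [PySem.Chars.join_cons_cons, List.flatten_cons, ← ih]
          simp

-- the string A assembles from the reversed remainder list is B's recursive rendering
theorem rem9_reverse_flat (a : Int) :
    ((rem9 a).reverse.map PySem.Int.toChars).flatten = to9Chars a := by
  fun_induction rem9 a with
  | case1 a h ih =>
      conv_rhs => rw [to9Chars_pos (show ¬ a ≤ 0 by omega)]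
      simp only [List.reverse_cons, List.map_append, List.flatten_append, ih]
      simp
  | case2 a h =>
      rw [to9Chars_nonpos (by omega)]
      simp

-- ===== VERDICT (by name: the statement is the Claim_ definition above) =====
theorem ary_system_spec : Claim_equal_ary_system := by
  intro num _
  unfold Spec_ary_system ary_system ary_system_alt
  by_cases h0 : num = 0
  · simp [h0]
  · simp only [if_neg h0]
    apply String.toList_inj.mp
    rw [PySem.Str.toList_join, aryLoop1_eq, aryLoop2_eq]
    simp only [zero_add, pow_zero, one_mul, List.nil_append, List.map_map, String.toList_ofList]
    rw [show String.toList ∘ PySem.Int.toStr = PySem.Int.toChars from funext PySem.Int.toList_toStr]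
    rw [show ("" : String).toList = ([] : List Char) from rfl]
    rw [join_empty_flatten, rem9_reverse_flat]
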